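-- pv_equiv track=rewrite | github.com/Charlie0921/CMPSC-132 | Module 4/LAB3/neighbor.py | neighbor
-- ===== SOURCE A (Python) =====
-- def neighbor(n):
--     '''
--         >>> neighbor(24680)
--         24680
--         >>> neighbor(2222466666678)
--         24678
--         >>> neighbor(0)
--         0
--         >>> neighbor(22224666666782)
--         246782
--         >>> neighbor(2222466666625)
--         24625
--     '''
--     ## YOUR CODE STARTS HERE
--     if n == 0:
--       return 0
--
--     elif (n%100)//10 == n%10:
--       return neighbor(n//10)
--
--     elif (n%100)//10 != n%10:
--       first = n % 10
--       new = neighbor(n//10)*10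
--       return first + new
-- ===== SOURCE B (Python) =====
-- def neighbor(n):
--     # Three-phase pipeline: extract digit list, adjacent-dedup pass, refold.
--     digits = []                 # least-significant first
--     while n > 0:
--         n, d = divmod(n, 10)
--         digits.append(d)
--     kept = []
--     for d in digits:
--         if not kept or kept[-1] != d:
--             kept.append(d)
--     result = 0
--     for d in reversed(kept):
--         result = result * 10 + d
--     return result
-- ===== Notes on version B (the rewrite author's own statement) =====
-- stated objective: alternative
-- what changed: Replaced the arithmetic right-recursion with a three-phase iterative pipeline: extract the digit list by divmod, one adjacent-dedup pass over the list, then refold the kept digits into an integer.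
import Mathlib
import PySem

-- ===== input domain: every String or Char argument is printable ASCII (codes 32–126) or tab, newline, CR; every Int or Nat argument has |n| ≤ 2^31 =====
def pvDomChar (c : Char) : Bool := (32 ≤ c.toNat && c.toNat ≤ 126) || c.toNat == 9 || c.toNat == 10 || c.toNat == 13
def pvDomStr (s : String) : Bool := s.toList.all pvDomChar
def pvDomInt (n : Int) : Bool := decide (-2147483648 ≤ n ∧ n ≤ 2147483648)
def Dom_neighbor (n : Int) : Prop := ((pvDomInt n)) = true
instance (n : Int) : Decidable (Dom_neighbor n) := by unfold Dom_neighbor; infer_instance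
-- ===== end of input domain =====

-- B replaces A's arithmetic right-recursion with an iterative digit-list pipeline
-- (extract digits / adjacent dedup / refold); equal return values proved for n ≥ 0.

-- ===== PORT A =====
-- Python A recurses forever on n < 0 (outside Pre_); the n < 0 guard only makes the port total there.
def neighbor (n : Int) : Int :=
  if n = 0 then 0
  else if n < 0 then 0
  else if PySem.Int.floordiv (PySem.Int.mod n 100) 10 = PySem.Int.mod n 10 then
    neighbor (PySem.Int.floordiv n 10)
  else
    PySem.Int.mod n 10 + neighbor (PySem.Int.floordiv n 10) * 10
termination_by n.toNat
decreasing_by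
  all_goals
    rw [PySem.Int.floordiv_eq_ediv_of_pos (by omega)]
    omega

-- ===== PORT B =====
-- the `while n > 0: n, d = divmod(n, 10); digits.append(d)` loop (digits least-significant first)
def pvDigitsB (n : Int) : List Int :=
  if n > 0 then
    PySem.Int.mod n 10 :: pvDigitsB (PySem.Int.floordiv n 10)
  else []
termination_by n.toNat
decreasing_by
  rw [PySem.Int.floordiv_eq_ediv_of_pos (by omega)]
  omega

-- one step of the `for d in digits: if not kept or kept[-1] != d: kept.append(d)` loop
def pvKeptStep (kept : List Int) (d : Int) : List Int :=
  if kept = [] then kept ++ [d]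
  else if kept.getLast? ≠ some d then kept ++ [d]
  else kept

def neighbor_alt (n : Int) : Int :=
  let digits := pvDigitsB n
  let kept := digits.foldl pvKeptStep []
  kept.reverse.foldl (fun r d => r * 10 + d) 0

-- ===== PRECONDITION & SPEC =====
-- Pre_ excludes n < 0, on which Python A recurses forever (RecursionError), returning nothing.
def Pre_neighbor (n : Int) : Prop := 0 ≤ n
instance (n : Int) : Decidable (Pre_neighbor n) := by unfold Pre_neighbor; infer_instance
def pvWitness_neighbor : Int := (24680)

def Spec_neighbor (n : Int) (out : Int) : Prop := out = neighbor_alt n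
instance (n : Int) (out : Int) : Decidable (Spec_neighbor n out) := by unfold Spec_neighbor; infer_instance

-- ===== CLAIM (what is proved, stated in full; the proofs are below) =====
def Claim_equal_neighbor : Prop := ∀ (n : Int), Dom_neighbor n → Pre_neighbor n → Spec_neighbor n (neighbor n)

-- ===== LEMMAS AND PROOFS =====

-- proof-side characterisation of the dedup loop once `kept` is nonempty with last element p
def pvKeepFrom (p : Int) : List Int → List Int
  | [] => []
  | d :: ds => if d = p then pvKeepFrom p ds else d :: pvKeepFrom d ds

lemma pvKeptStep_concat (acc : List Int) (d e : Int) :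
    pvKeptStep (acc ++ [d]) e = if e = d then acc ++ [d] else acc ++ [d, e] := by
  unfold pvKeptStep
  rw [if_neg (by simp)]
  by_cases he : e = d
  · rw [if_neg (by simp [he]), if_pos he]
  · rw [if_pos (by simp; intro h; exact he h.symm), if_neg he]
    simp

lemma pvKeptStep_foldl (ds : List Int) : ∀ (acc : List Int) (d : Int),
    ds.foldl pvKeptStep (acc ++ [d]) = (acc ++ [d]) ++ pvKeepFrom d ds := by
  induction ds with
  | nil => intro acc d; simp [pvKeepFrom]
  | cons e ds ih =>
    intro acc d
    simp only [List.foldl_cons, pvKeptStep_concat]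
    by_cases he : e = d
    · subst he
      rw [if_pos rfl, ih acc e, pvKeepFrom, if_pos rfl]
    · rw [if_neg he, pvKeepFrom, if_neg he]
      have h2 : acc ++ [d, e] = (acc ++ [d]) ++ [e] := by simp
      rw [h2, ih (acc ++ [d]) e]
      simp

lemma pvDigits_pos {n : Int} (h : 0 < n) :
    pvDigitsB n = PySem.Int.mod n 10 :: pvDigitsB (PySem.Int.floordiv n 10) := by
  rw [pvDigitsB]; rw [if_pos h]

lemma pvRefold_cons (d : Int) (l : List Int) :
    (d :: l).reverse.foldl (fun r d => r * 10 + d) 0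
      = 10 * (l.reverse.foldl (fun r d => r * 10 + d) 0) + d := by
  simp [List.reverse_cons, List.foldl_append]; ring

lemma neighbor_alt_pos {n : Int} (h : 0 < n) :
    neighbor_alt n
      = 10 * ((pvKeepFrom (PySem.Int.mod n 10) (pvDigitsB (PySem.Int.floordiv n 10))).reverse.foldl
            (fun r d => r * 10 + d) 0) + PySem.Int.mod n 10 := by
  unfold neighbor_alt
  rw [pvDigits_pos h]
  simp only [List.foldl_cons]
  have h1 : pvKeptStep [] (PySem.Int.mod n 10) = [] ++ [PySem.Int.mod n 10] := by
    simp [pvKeptStep]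
  rw [h1, pvKeptStep_foldl _ [] _]
  simp only [List.nil_append, List.singleton_append]
  exact pvRefold_cons _ _

lemma pv_main : ∀ (N : Nat) (n : Int), n.toNat ≤ N → 0 ≤ n → neighbor n = neighbor_alt n := by
  intro N
  induction N with
  | zero =>
    intro n hN h0
    have hn : n = 0 := by omega
    subst hn
    simp [neighbor, neighbor_alt, pvDigitsB]
  | succ N ih =>
    intro n hN h0
    by_cases hz : n = 0
    · subst hz; simp [neighbor, neighbor_alt, pvDigitsB]
    have hp : 0 < n := by omega
    have hm0 : (0:Int) < 10 := by norm_num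
    have hdf : PySem.Int.floordiv n 10 = n / 10 := PySem.Int.floordiv_eq_ediv_of_pos hm0
    have hdm : PySem.Int.mod n 10 = n % 10 := PySem.Int.mod_eq_emod_of_pos hm0
    -- tens digit identity: (n % 100) // 10 = (n // 10) % 10
    have htens : PySem.Int.floordiv (PySem.Int.mod n 100) 10 = PySem.Int.mod (PySem.Int.floordiv n 10) 10 := by
      rw [PySem.Int.floordiv_eq_ediv_of_pos hm0, PySem.Int.mod_eq_emod_of_pos (by norm_num : (0:Int) < 100),
          hdf, PySem.Int.mod_eq_emod_of_pos hm0]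
      omega
    have hmnn : 0 ≤ n / 10 := by omega
    have hlt : (n / 10).toNat ≤ N := by omega
    have IH := ih (PySem.Int.floordiv n 10) (by rw [hdf]; exact hlt) (by rw [hdf]; exact hmnn)
    rw [neighbor]
    rw [if_neg hz, if_neg (by omega)]
    by_cases hm : PySem.Int.floordiv n 10 = 0
    · -- single digit: n // 10 = 0, tens digit is 0, ones digit n % 10 = n ≠ 0
      have hn10 : n < 10 := by omega
      have hones : PySem.Int.mod n 10 = n := by rw [hdm]; omega
      rw [if_neg (by rw [htens, hm, hones, PySem.Int.mod_eq_emod_of_pos hm0]; omega)]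
      rw [IH, neighbor_alt_pos hp, hm]
      simp [neighbor_alt, pvDigitsB, pvKeepFrom]
    · have hmp : 0 < PySem.Int.floordiv n 10 := by rw [hdf] at hm ⊢; omega
      by_cases heq : PySem.Int.mod (PySem.Int.floordiv n 10) 10 = PySem.Int.mod n 10
      · rw [if_pos (by rw [htens]; exact heq)]
        rw [IH, neighbor_alt_pos hp, neighbor_alt_pos hmp]
        rw [pvDigits_pos hmp, pvKeepFrom, if_pos heq, ← heq]
      · rw [if_neg (by rw [htens]; exact heq)]
        rw [IH, neighbor_alt_pos hp, neighbor_alt_pos hmp]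
        rw [pvDigits_pos hmp, pvKeepFrom, if_neg heq, pvRefold_cons]
        ring

-- ===== VERDICT (by name: the statement is the Claim_ definition above) =====
theorem neighbor_spec : Claim_equal_neighbor := by
  intro n _ hpre
  unfold Spec_neighbor
  exact pv_main n.toNat n le_rfl hpre
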